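-- pv_equiv track=rewrite | github.com/ANANDU-2000/PurchaseAssiastant | backend/app/routers/me.py | _norm_dir_name
-- ===== SOURCE A (Python) =====
-- def _norm_dir_name(s: str) -> str:
--     t = (s or "").strip().lower()
--     out: list[str] = []
--     for ch in t:
--         if ch.isalnum() or ch.isspace():
--             out.append(ch)
--         else:
--             out.append(" ")
--     return " ".join("".join(out).split())
-- ===== SOURCE B (Python) =====
-- def _norm_dir_name(s: str) -> str:
--     # Single-pass tokenizer: alnum chars extend the current word, anything else
--     # (whitespace or punctuation) is a delimiter that flushes the word buffer.
--     t = (s or "").strip().lower()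
--     words: list[str] = []
--     buf: list[str] = []
--     for ch in t:
--         if ch.isalnum():
--             buf.append(ch)
--         elif buf:
--             words.append("".join(buf))
--             buf = []
--     if buf:
--         words.append("".join(buf))
--     return " ".join(words)
-- ===== Notes on version B (the rewrite author's own statement) =====
-- stated objective: alternative
-- what changed: Replaces A's map-to-space pass followed by split()/join with a single-pass tokenizer that buffers alnum runs and flushes them into a word list on any delimiter, never building the intermediate space-mapped string.
import Mathlib
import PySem

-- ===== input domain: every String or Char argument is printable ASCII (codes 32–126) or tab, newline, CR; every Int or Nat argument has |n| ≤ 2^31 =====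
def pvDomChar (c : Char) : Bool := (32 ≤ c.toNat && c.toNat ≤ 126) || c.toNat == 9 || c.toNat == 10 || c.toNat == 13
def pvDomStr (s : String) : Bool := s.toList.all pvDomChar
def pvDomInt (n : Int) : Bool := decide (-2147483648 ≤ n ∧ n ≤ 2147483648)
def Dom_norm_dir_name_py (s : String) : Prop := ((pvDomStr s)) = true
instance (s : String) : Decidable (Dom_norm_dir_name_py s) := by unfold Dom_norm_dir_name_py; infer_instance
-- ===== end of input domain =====

-- B replaces A's map-non-alnum-to-space + split()/join pipeline by a single-pass
-- tokenizer (buffer alnum runs, flush on any delimiter); same cost, different structure.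


-- ===== PORT A =====
-- A: t = (s or "").strip().lower(); loop appends ch (alnum/space) or " "; then
-- " ".join("".join(out).split()).  Python's `s or ""` equals s for strings ("" stays "").
-- out is a list of 1-char strings; "".join(out) is the char list the foldl builds.
def norm_dir_name_py (s : String) : String :=
  let t := PySem.Str.lower (PySem.Str.strip s)
  let out := t.toList.foldl
    (fun acc ch =>
      acc ++ [if PySem.Chars.isalnum ch || PySem.Chars.isspace ch then ch else ' '])
    ([] : List Char)
  String.ofList (PySem.Chars.join [' '] (PySem.Chars.split₀ out))

-- ===== PORT B =====
-- B's loop: buf collects alnum chars; any other char flushes a non-empty buf into words.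
def normDirAltGo : List Char → List Char → List (List Char) → List (List Char)
  | [], buf, words => if buf.isEmpty then words else words ++ [buf]
  | ch :: rest, buf, words =>
    if PySem.Chars.isalnum ch then normDirAltGo rest (buf ++ [ch]) words
    else if buf.isEmpty then normDirAltGo rest [] words
    else normDirAltGo rest [] (words ++ [buf])

def norm_dir_name_py_alt (s : String) : String :=
  let t := PySem.Str.lower (PySem.Str.strip s)
  String.ofList (PySem.Chars.join [' '] (normDirAltGo t.toList [] []))

-- ===== PRECONDITION & SPEC =====
def Spec_norm_dir_name_py (s : String) (out : String) : Prop := out = norm_dir_name_py_alt s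
instance (s : String) (out : String) : Decidable (Spec_norm_dir_name_py s out) := by unfold Spec_norm_dir_name_py; infer_instance

-- ===== CLAIM (what is proved, stated in full; the proofs are below) =====
def Claim_equal_norm_dir_name_py : Prop := ∀ (s : String), Dom_norm_dir_name_py s → Spec_norm_dir_name_py s (norm_dir_name_py s)

-- ===== LEMMAS AND PROOFS =====

-- alnum and space characters are disjoint
theorem isalnum_isspace_false (c : Char) (h : PySem.Chars.isalnum c = true) :
    PySem.Chars.isspace c = false := by
  have hA : 'A'.val.toNat = 65 := by decide
  have hZ : 'Z'.val.toNat = 90 := by decide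
  have ha : 'a'.val.toNat = 97 := by decide
  have hz : 'z'.val.toNat = 122 := by decide
  have h0 : '0'.val.toNat = 48 := by decide
  have h9 : '9'.val.toNat = 57 := by decide
  simp only [PySem.Chars.isalnum, PySem.Chars.isalpha, PySem.Chars.isdigit, PySem.Chars.isspace,
        PySem.Chars.isupper, PySem.Chars.islower, Char.le_def, Bool.or_eq_true, Bool.and_eq_true,
        decide_eq_true_eq, Bool.or_eq_false_iff, Bool.and_eq_false_iff, decide_eq_false_iff_not,
        UInt32.le_iff_toNat_le, Char.toNat, hA, hZ, ha, hz, h0, h9] at *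
  omega

-- A's per-character replacement
def normDirF (ch : Char) : Char :=
  if PySem.Chars.isalnum ch || PySem.Chars.isspace ch then ch else ' '

theorem isspace_normDirF (ch : Char) :
    PySem.Chars.isspace (normDirF ch) = !(PySem.Chars.isalnum ch) := by
  unfold normDirF
  by_cases ha : PySem.Chars.isalnum ch = true
  · simp [ha, isalnum_isspace_false ch ha]
  · simp only [Bool.not_eq_true] at ha
    by_cases hs : PySem.Chars.isspace ch = true
    · simp [ha, hs]
    · simp only [Bool.not_eq_true] at hs
      simp [ha, hs]
      decide

theorem normDirF_of_alnum (ch : Char) (h : PySem.Chars.isalnum ch = true) :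
    normDirF ch = ch := by simp [normDirF, h]

-- split() of the space-mapped string IS B's tokenizer (go-level invariant)
theorem split₀_go_eq_alt (t : List Char) :
    ∀ (cur : List Char) (acc : List (List Char)),
      PySem.Chars.split₀.go (t.map normDirF) cur acc
        = normDirAltGo t cur.reverse acc.reverse := by
  induction t with
  | nil =>
    intro cur acc
    simp only [List.map_nil, PySem.Chars.split₀.go, normDirAltGo]
    by_cases hc : cur.isEmpty = true
    · simp [List.isEmpty_iff.mp hc]
    · have hcr : cur.reverse.isEmpty = false := by
        simp only [Bool.not_eq_true] at hc
        simpa using hc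
      simp [hc, hcr]
  | cons ch rest ih =>
    intro cur acc
    have hs := isspace_normDirF ch
    by_cases ha : PySem.Chars.isalnum ch = true
    · have hsp := isalnum_isspace_false ch ha
      simp only [List.map_cons, PySem.Chars.split₀.go, normDirF_of_alnum ch ha, hsp,
                 Bool.false_eq_true, if_false]
      rw [show normDirAltGo (ch :: rest) cur.reverse acc.reverse
            = normDirAltGo rest (cur.reverse ++ [ch]) acc.reverse from by
          simp [normDirAltGo, ha]]
      simpa using ih (ch :: cur) acc
    · simp only [Bool.not_eq_true] at ha
      rw [ha] at hs
      simp only [Bool.not_false] at hs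
      simp only [List.map_cons, PySem.Chars.split₀.go, hs, if_true]
      by_cases hc : cur = []
      · subst hc
        simp only [List.isEmpty_nil, if_true, List.reverse_nil]
        rw [show normDirAltGo (ch :: rest) [] acc.reverse
              = normDirAltGo rest [] acc.reverse from by simp [normDirAltGo, ha]]
        simpa using ih [] acc
      · have hce : cur.isEmpty = false := by simpa using hc
        have hcr : cur.reverse.isEmpty = false := by simpa using hc
        simp only [hce, Bool.false_eq_true, if_false]
        rw [show normDirAltGo (ch :: rest) cur.reverse acc.reverse
              = normDirAltGo rest [] (acc.reverse ++ [cur.reverse]) from by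
            simp [normDirAltGo, ha, hcr]]
        simpa using ih [] (cur.reverse :: acc)

-- A's foldl of singleton appends is the map by normDirF
theorem foldl_out_eq_map (t : List Char) :
    t.foldl (fun acc ch =>
        acc ++ [if PySem.Chars.isalnum ch || PySem.Chars.isspace ch then ch else ' '])
      ([] : List Char) = t.map normDirF :=
  (PySem.List.foldl_append_singleton_eq_map normDirF t ([] : List Char)).trans
    (List.nil_append _)

-- ===== VERDICT (by name: the statement is the Claim_ definition above) =====
theorem norm_dir_name_py_spec : Claim_equal_norm_dir_name_py := by
  intro s _
  unfold Spec_norm_dir_name_py norm_dir_name_py norm_dir_name_py_alt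
  simp only [foldl_out_eq_map]
  rw [show PySem.Chars.split₀ ((PySem.Str.lower (PySem.Str.strip s)).toList.map normDirF)
        = normDirAltGo (PySem.Str.lower (PySem.Str.strip s)).toList [] [] from by
      simpa using split₀_go_eq_alt (PySem.Str.lower (PySem.Str.strip s)).toList [] []]
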